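-- pv_equiv track=rewrite | github.com/NicholasKobald/snake2017-2018 | app/shared.py | prefer_nearest_food
-- ===== SOURCE A (Python) =====
-- def prefer_nearest_food(move_dict):
--     moves_to_nearest_food, cur_nearest_food_dist = [], float('inf')
--     for move, path_lengths in move_dict.items():
--         for food_dist in path_lengths:
--             if food_dist < cur_nearest_food_dist:
--                 cur_nearest_food_dist = food_dist
--                 moves_to_nearest_food = [move]
--             elif food_dist == cur_nearest_food_dist:
--                 if move not in moves_to_nearest_food:
--                     moves_to_nearest_food.append(move)
--     return moves_to_nearest_food
-- ===== SOURCE B (Python) =====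
-- def prefer_nearest_food(move_dict):
--     best = min((d for lengths in move_dict.values() for d in lengths),
--                default=float('inf'))
--     return [move for move, lengths in move_dict.items() if best in lengths]
-- ===== Notes on version B (the rewrite author's own statement) =====
-- stated objective: simpler
-- what changed: Replaces A's single stateful scan (running minimum with reset-and-append of the move list) by a two-pass 'compute the global minimum, then filter the moves whose distance list contains it', preserving dict order.
import Mathlib
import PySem

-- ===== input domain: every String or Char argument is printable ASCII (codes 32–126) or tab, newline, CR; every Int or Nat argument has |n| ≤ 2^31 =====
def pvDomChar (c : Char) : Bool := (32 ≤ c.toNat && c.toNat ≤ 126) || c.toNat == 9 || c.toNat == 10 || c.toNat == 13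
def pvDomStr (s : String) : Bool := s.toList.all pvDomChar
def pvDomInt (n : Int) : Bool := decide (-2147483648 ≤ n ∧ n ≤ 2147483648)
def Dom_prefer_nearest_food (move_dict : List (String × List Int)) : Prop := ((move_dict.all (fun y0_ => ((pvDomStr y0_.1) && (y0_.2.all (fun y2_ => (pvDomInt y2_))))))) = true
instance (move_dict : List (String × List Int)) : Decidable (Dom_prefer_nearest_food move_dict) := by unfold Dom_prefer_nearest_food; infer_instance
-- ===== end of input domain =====

-- B replaces A's single stateful scan (running minimum with reset-and-append) by a
-- two-pass "global minimum, then filter the moves containing it" (objective: simpler).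

-- ===== PORT A =====
-- state: (moves_to_nearest_food, cur_nearest_food_dist); `none` plays float('inf')
-- inner loop: `for food_dist in path_lengths`
def pnfInner (move : String) (st : List String × Option Int) : List Int → List String × Option Int
  | [] => st
  | d :: ds =>
      let st' : List String × Option Int :=
        match st.2 with
        | none => ([move], some d)                  -- d < inf: reset
        | some c =>
          if d < c then ([move], some d)
          else if d = c then (if move ∈ st.1 then st else (st.1 ++ [move], some c))
          else st
      pnfInner move st' ds

-- outer loop: `for move, path_lengths in move_dict.items()`
def pnfOuter (st : List String × Option Int) : List (String × List Int) → List String × Option Int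
  | [] => st
  | p :: ps => pnfOuter (pnfInner p.1 st p.2) ps

def prefer_nearest_food (move_dict : List (String × List Int)) : List String :=
  (pnfOuter ([], none) move_dict).1

-- ===== PORT B =====
-- best = min(flattened distances, default=inf); then keep the moves whose list contains it
def prefer_nearest_food_alt (move_dict : List (String × List Int)) : List String :=
  match (move_dict.flatMap Prod.snd).min? with
  | none => []
  | some b => (move_dict.filter (fun p => p.2.contains b)).map Prod.fst

-- ===== PRECONDITION & SPEC =====
-- move_dict is a Python dict, whose keys are necessarily distinct; Pre_ states exactly
-- that convention (it excludes no input the Python function is ever called on).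
def Pre_prefer_nearest_food (move_dict : List (String × List Int)) : Prop :=
  (move_dict.map Prod.fst).Nodup
instance (move_dict : List (String × List Int)) : Decidable (Pre_prefer_nearest_food move_dict) := by unfold Pre_prefer_nearest_food; infer_instance

def pvWitness_prefer_nearest_food : (List (String × List Int)) :=
  [("up", [3, 1]), ("down", [1, 2]), ("left", [])]

def Spec_prefer_nearest_food (move_dict : List (String × List Int)) (out : List String) : Prop := out = prefer_nearest_food_alt move_dict
instance (move_dict : List (String × List Int)) (out : List String) : Decidable (Spec_prefer_nearest_food move_dict out) := by unfold Spec_prefer_nearest_food; infer_instance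

-- ===== CLAIM (what is proved, stated in full; the proofs are below) =====
def Claim_equal_prefer_nearest_food : Prop := ∀ (move_dict : List (String × List Int)), Dom_prefer_nearest_food move_dict → Pre_prefer_nearest_food move_dict → Spec_prefer_nearest_food move_dict (prefer_nearest_food move_dict)

-- ===== LEMMAS AND PROOFS =====

-- Characterisation of one pass of A's inner loop.
theorem pnfInner_spec (m : String) :
    ∀ (ds : List Int) (lst : List String) (cur : Option Int),
      pnfInner m (lst, cur) ds =
        match ds.min?, cur with
        | none, _ => (lst, cur)
        | some dm, none => ([m], some dm)
        | some dm, some c =>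
            if dm < c then ([m], some dm)
            else if dm = c then ((if m ∈ lst then lst else lst ++ [m]), some c)
            else (lst, cur) := by
  intro ds
  induction ds with
  | nil => intro lst cur; simp [pnfInner]
  | cons d ds ih =>
    intro lst cur
    simp only [pnfInner, List.min?_cons]
    cases cur with
    | none =>
      simp only [ih]
      cases h : ds.min? with
      | none => simp
      | some dm =>
        simp only [Option.elim]
        rcases lt_trichotomy dm d with hlt | heq | hgt
        · simp [hlt, min_eq_right hlt.le, if_neg (lt_irrefl dm)]
        · subst heq; simp
        · have : ¬ dm < d := not_lt.mpr hgt.le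
          simp [this, min_eq_left hgt.le]
    | some c =>
      by_cases hdc : d < c
      · simp only [if_pos hdc, ih]
        cases h : ds.min? with
        | none => simp [hdc]
        | some dm =>
          simp only [Option.elim]
          rcases lt_trichotomy dm d with hlt | heq | hgt
          · simp [hlt, min_eq_right hlt.le, lt_trans hlt hdc]
          · subst heq; simp [hdc]
          · have h1 : ¬ dm < d := not_lt.mpr hgt.le
            simp [h1, min_eq_left hgt.le, hdc]
      · by_cases hde : d = c
        · subst hde
          simp only [if_neg hdc, if_pos rfl, ih]
          by_cases hm : m ∈ lst
          · simp only [if_pos hm]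
            cases h : ds.min? with
            | none => simp [hdc]
            | some dm =>
              simp only [Option.elim]
              rcases lt_trichotomy dm d with hlt | heq | hgt
              · simp [hlt, min_eq_right hlt.le]
              · subst heq; simp [hm]
              · have h1 : ¬ dm < d := not_lt.mpr hgt.le
                simp [h1, min_eq_left hgt.le, hm, hdc]
          · simp only [if_neg hm]
            cases h : ds.min? with
            | none => simp [hdc, hm]
            | some dm =>
              simp only [Option.elim]
              rcases lt_trichotomy dm d with hlt | heq | hgt
              · simp [hlt, min_eq_right hlt.le]
              · subst heq; simp [hm]
              · have h1 : ¬ dm < d := not_lt.mpr hgt.le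
                simp [h1, min_eq_left hgt.le, hm, hdc]
        · have hgt : c < d := lt_of_le_of_ne (not_lt.mp hdc) (Ne.symm hde)
          simp only [if_neg hdc, if_neg hde, ih]
          cases h : ds.min? with
          | none => simp [hdc, hde]
          | some dm =>
            simp only [Option.elim]
            rcases lt_trichotomy (min d dm) c with hlt | heq | hgt2
            · have : dm < c := by
                rcases min_cases d dm with ⟨he, _⟩ | ⟨he, hle⟩
                · omega
                · omega
              simp [hlt, this, min_eq_right (by omega : dm ≤ d)]
            · have hdm : dm = c := by
                rcases min_cases d dm with ⟨he, _⟩ | ⟨he, hle⟩ <;> omega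
              subst hdm
              simp [heq, hdc, hde, min_eq_right (le_of_lt hgt)]
            · have hdm : ¬ dm < c := by
                rcases min_cases d dm with ⟨he, _⟩ | ⟨he, hle⟩ <;> omega
              have hdm2 : dm ≠ c := by
                rcases min_cases d dm with ⟨he, _⟩ | ⟨he, hle⟩ <;> omega
              have hne : min d dm ≠ c := hgt2.ne'
              simp [not_lt_of_gt hgt2, hne, hdm, hdm2]

-- min? of an append, as a combine of the two min?s
theorem pvMin?_append (xs ys : List Int) :
    (xs ++ ys).min? = match xs.min?, ys.min? with
      | none, m => m
      | some a, none => some a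
      | some a, some b => some (min a b) := by
  induction xs with
  | nil =>
    cases h : ys.min? with
    | none => simp only [List.nil_append, List.min?_nil, h]
    | some b => simp only [List.nil_append, List.min?_nil, h]
  | cons x xs ih =>
    simp only [List.cons_append, List.min?_cons, ih]
    cases hx : xs.min? <;> cases hy : ys.min? <;>
      simp [Option.elim, min_assoc]

theorem min?_le_of_mem {ds : List Int} {x m : Int} (hx : x ∈ ds) (hm : ds.min? = some m) :
    m ≤ x := (List.min?_eq_some_iff.mp hm).2 x hx

-- no pair of ps contains a value strictly below the minimum of the flattened lists
theorem pvFilter_contains_nil {ps : List (String × List Int)} {b : Int}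
    (h : ∀ q ∈ ps, b ∉ q.2) :
    ps.filter (fun p => decide (b ∈ p.2)) = [] := by
  rw [List.filter_eq_nil_iff]
  intro q hq hc
  exact h q hq (by simpa using hc)

theorem pvBelow_min {ps : List (String × List Int)} {b : Int}
    (hF : ∀ f, (ps.flatMap Prod.snd).min? = some f → b < f) :
    ∀ q ∈ ps, b ∉ q.2 := by
  intro q hq hb
  have hbF : b ∈ ps.flatMap Prod.snd := List.mem_flatMap.mpr ⟨q, hq, hb⟩
  cases hm : (ps.flatMap Prod.snd).min? with
  | none => rw [List.min?_eq_none_iff.mp hm] at hbF; cases hbF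
  | some f => exact absurd (min?_le_of_mem hbF hm) (by have := hF f hm; omega)

-- Invariant for the outer loop: starting from state (lst, cur), with every key of ps absent
-- from lst and the keys of ps distinct, the loop computes the B-side description.
theorem pnfOuter_spec :
    ∀ (ps : List (String × List Int)) (lst : List String) (cur : Option Int),
      (ps.map Prod.fst).Nodup →
      (∀ p ∈ ps, p.1 ∉ lst) →
      (pnfOuter (lst, cur) ps).1 =
        match (ps.flatMap Prod.snd).min?, cur with
        | none, _ => lst
        | some b, none => (ps.filter (fun p => p.2.contains b)).map Prod.fst
        | some b, some c =>
            if b < c then (ps.filter (fun p => p.2.contains b)).map Prod.fst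
            else if b = c then lst ++ (ps.filter (fun p => p.2.contains b)).map Prod.fst
            else lst := by
  intro ps
  induction ps with
  | nil =>
    intro lst cur _ _
    cases cur <;> simp [pnfOuter]
  | cons p ps ih =>
    intro lst cur hnd habs
    obtain ⟨m, ds⟩ := p
    have hm0 : m ∉ lst := habs (m, ds) List.mem_cons_self
    rw [List.map_cons, List.nodup_cons] at hnd
    have hnd' : (ps.map Prod.fst).Nodup := hnd.2
    have hmnot : ∀ q ∈ ps, q.1 ≠ m := by
      intro q hq he
      exact hnd.1 (List.mem_map.mpr ⟨q, hq, he⟩)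
    have habs' : ∀ q ∈ ps, q.1 ∉ lst := fun q hq => habs q (List.mem_cons_of_mem _ hq)
    simp only [pnfOuter, pnfInner_spec, List.flatMap_cons, pvMin?_append, List.filter_cons]
    cases hds : ds.min? with
    | none =>
      have hdse : ds = [] := List.min?_eq_none_iff.mp hds
      subst hdse
      rw [ih lst cur hnd' habs']
      cases hF : (ps.flatMap Prod.snd).min? <;> cases cur <;> simp
    | some dm =>
      have hmem : dm ∈ ds := (List.min?_eq_some_iff.mp hds).1
      have hle : ∀ x ∈ ds, dm ≤ x := (List.min?_eq_some_iff.mp hds).2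
      have hclt : ∀ b : Int, b < dm → b ∉ ds := by
        intro b hb hbm
        have := hle b hbm; omega
      cases cur with
      | none =>
        rw [ih [m] (some dm) hnd' (by intro q hq; simpa using hmnot q hq)]
        cases hF : (ps.flatMap Prod.snd).min? with
        | none =>
          have hnil := pvFilter_contains_nil (ps := ps) (b := dm)
            (pvBelow_min (by intro f hf; rw [hF] at hf; cases hf))
          simp [hmem, hnil]
        | some f =>
          rcases lt_trichotomy f dm with hlt | heq | hgt
          · simp [hlt, hlt.ne, min_eq_right hlt.le, hclt f hlt]
          · subst heq; simp [hmem]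
          · have hnil := pvFilter_contains_nil (ps := ps) (b := dm)
              (pvBelow_min (by intro f' hf'; rw [hF] at hf'; cases hf'; omega))
            simp [not_lt_of_gt hgt, hgt.ne', min_eq_left hgt.le, hmem, hnil]
      | some c =>
        dsimp only
        by_cases hdc : dm < c
        · rw [if_pos hdc, ih [m] (some dm) hnd' (by intro q hq; simpa using hmnot q hq)]
          cases hF : (ps.flatMap Prod.snd).min? with
          | none =>
            have hnil := pvFilter_contains_nil (ps := ps) (b := dm)
              (pvBelow_min (by intro f hf; rw [hF] at hf; cases hf))
            simp [hmem, hnil, hdc]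
          | some f =>
            rcases lt_trichotomy f dm with hlt | heq | hgt
            · simp [hlt, hlt.ne, min_eq_right hlt.le, hclt f hlt, lt_trans hlt hdc]
            · subst heq; simp [hmem, hdc]
            · have hnil := pvFilter_contains_nil (ps := ps) (b := dm)
                (pvBelow_min (by intro f' hf'; rw [hF] at hf'; cases hf'; omega))
              simp [not_lt_of_gt hgt, hgt.ne', min_eq_left hgt.le, hmem, hnil, hdc]
        · by_cases hde : dm = c
          · subst hde
            rw [if_neg hdc, if_pos rfl, if_neg hm0,
              ih (lst ++ [m]) (some dm) hnd'
                (by intro q hq; simp [habs' q hq, hmnot q hq])]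
            cases hF : (ps.flatMap Prod.snd).min? with
            | none =>
              have hnil := pvFilter_contains_nil (ps := ps) (b := dm)
                (pvBelow_min (by intro f hf; rw [hF] at hf; cases hf))
              simp [hmem, hnil]
            | some f =>
              rcases lt_trichotomy f dm with hlt | heq | hgt
              · simp [hlt, hlt.ne, min_eq_right hlt.le, hclt f hlt]
              · subst heq; simp [hmem]
              · have hnil := pvFilter_contains_nil (ps := ps) (b := dm)
                  (pvBelow_min (by intro f' hf'; rw [hF] at hf'; cases hf'; omega))
                simp [not_lt_of_gt hgt, hgt.ne', min_eq_left hgt.le, hmem, hnil]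
          · have hcgt : c < dm := lt_of_le_of_ne (not_lt.mp hdc) (Ne.symm hde)
            rw [if_neg hdc, if_neg hde, ih lst (some c) hnd' habs']
            cases hF : (ps.flatMap Prod.snd).min? with
            | none => simp [hdc, hde]
            | some f =>
              rcases lt_trichotomy f c with hlt | heq | hgt
              · simp [hlt, min_eq_right (by omega : f ≤ dm), hclt f (by omega)]
              · subst heq; simp [min_eq_right hcgt.le, hcgt, hclt f hcgt, not_lt_of_gt hcgt, hde]
              · have h1 : ¬ min dm f < c := by
                  rcases min_cases dm f with ⟨he, _⟩ | ⟨he, _⟩ <;> omega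
                have h2 : min dm f ≠ c := by
                  rcases min_cases dm f with ⟨he, _⟩ | ⟨he, _⟩ <;> omega
                simp [h1, h2, not_lt_of_gt hgt, hgt.ne']

-- ===== VERDICT (by name: the statement is the Claim_ definition above) =====
theorem prefer_nearest_food_spec : Claim_equal_prefer_nearest_food := by
  intro md _ hpre
  unfold Spec_prefer_nearest_food prefer_nearest_food prefer_nearest_food_alt
  have := pnfOuter_spec md [] none hpre (by simp)
  rw [this]
  cases h : (md.flatMap Prod.snd).min? <;> simp
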